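-- pv_equiv track=rewrite | github.com/yskang/AlgorithmPractice | atcoder/python/beginner_d_756.py | solution
-- ===== SOURCE A (Python) =====
-- import collections
--
-- def add_power(n: int, ps: list):
--     i = 2
--     while n != 1:
--         if n % i == 0:
--             n = n // i
--             ps[i] += 1
--         else:
--             i += 1
--
-- def solution(n: int):
--     ps = [0 for _ in range(n+1)]
--
--     for i in range(2, n+1):
--         add_power(i, ps)
--
--     powers = collections.defaultdict(lambda: 0)
--
--     for p in range(2, n+1):
--         powers[p] = len(list(filter(lambda x: x >= p, ps)))
--
--     return powers[74] + powers[24] * (powers[2]-1) + powers[14] * (powers[4]-1) + powers[4] * (powers[4]-1) * (powers[2]-2)//2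
-- ===== SOURCE B (Python) =====
-- def solution(n: int):
--     counts = []
--     for p in range(2, n + 1):
--         if _is_prime(p):
--             e, q = 0, p
--             while q <= n:
--                 e += n // q
--                 q *= p
--             counts.append(e)
--     c2 = sum(1 for e in counts if e >= 2)
--     c4 = sum(1 for e in counts if e >= 4)
--     c14 = sum(1 for e in counts if e >= 14)
--     c24 = sum(1 for e in counts if e >= 24)
--     c74 = sum(1 for e in counts if e >= 74)
--     return c74 + c24 * (c2 - 1) + c14 * (c4 - 1) + c4 * (c4 - 1) * (c2 - 2) // 2
--
--
-- def _is_prime(p: int) -> bool: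
--     d = 2
--     while d * d <= p:
--         if p % d == 0:
--             return False
--         d += 1
--     return p >= 2
-- ===== Notes on version B (the rewrite author's own statement) =====
-- stated objective: faster
-- what changed: Instead of trial-factorizing every i in 2..n into a shared exponent array and then re-scanning that whole array for every p in 2..n, B computes each prime's exponent in n! directly by Legendre's formula (sum of n//p^k) with a sqrt-bounded primality test, and counts the five needed thresholds in one pass over the list of prime exponents.
import Mathlib
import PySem

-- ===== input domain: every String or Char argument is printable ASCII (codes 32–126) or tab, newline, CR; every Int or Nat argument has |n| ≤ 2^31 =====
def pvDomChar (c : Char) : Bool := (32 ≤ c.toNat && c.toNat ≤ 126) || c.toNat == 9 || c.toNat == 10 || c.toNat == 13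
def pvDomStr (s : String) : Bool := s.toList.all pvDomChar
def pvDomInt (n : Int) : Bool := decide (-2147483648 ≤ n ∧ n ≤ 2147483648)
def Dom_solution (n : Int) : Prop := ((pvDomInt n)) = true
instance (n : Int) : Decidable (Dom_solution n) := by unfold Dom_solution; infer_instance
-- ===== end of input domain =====

-- B computes each prime's exponent in n! by Legendre's formula with a sqrt-bounded trial
-- primality test, replacing A's per-integer trial factorization and per-p full array rescans.

-- ===== PORT A =====
-- while loop of add_power; the 'n < 2 ∨ i < 2 ∨ n < i' branch is a totality guard only:
-- it is never reached from solution's calls (Python diverges outside that region).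
def addPowerLoop (n i : Int) (ps : List Int) : List Int :=
  if n = 1 then ps
  else if n < 2 ∨ i < 2 ∨ n < i then ps
  else if PySem.Int.mod n i = 0 then
    addPowerLoop (PySem.Int.floordiv n i) i (ps.set i.toNat (ps.getD i.toNat 0 + 1))
  else addPowerLoop n (i + 1) ps
termination_by (2 * n - i).toNat
decreasing_by
  · have h1 : PySem.Int.floordiv n i = n / i := PySem.Int.floordiv_eq_ediv_of_pos (by omega)
    have hn : 2 ≤ n := by omega
    have hi : 2 ≤ i := by omega
    have h2 : n / i < n := by
      apply Int.ediv_lt_of_lt_mul (by omega); nlinarith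
    omega
  · omega

def solution (n : Int) : Int :=
  let ps0 : List Int := List.replicate (n + 1).toNat 0
  let ps := (PySem.List.pyRange 2 (n + 1) 1).foldl (fun acc i => addPowerLoop i 2 acc) ps0
  let powers : PySem.Dict Int Int :=
    (PySem.List.pyRange 2 (n + 1) 1).foldl
      (fun d p => d.insert p ((ps.filter (fun x => p ≤ x)).length : Int)) PySem.Dict.empty
  powers.getD 74 0 + powers.getD 24 0 * (powers.getD 2 0 - 1)
    + powers.getD 14 0 * (powers.getD 4 0 - 1)
    + PySem.Int.floordiv (powers.getD 4 0 * (powers.getD 4 0 - 1) * (powers.getD 2 0 - 2)) 2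

-- ===== PORT B =====
-- while loop of _is_prime
def isPrimeLoop (p d : Int) : Bool :=
  if d * d ≤ p then
    if PySem.Int.mod p d = 0 then false else isPrimeLoop p (d + 1)
  else decide (2 ≤ p)
termination_by (p + 1 - d).toNat
decreasing_by
  have : d ≤ p := by nlinarith
  omega

-- the 'e, q' while loop; the 'p < 2 ∨ q < 1' branch is a totality guard only: it is never
-- reached from solution_alt's calls (q is a positive power of a prime p there).
def legendreLoop (n p q e : Int) : Int :=
  if p < 2 ∨ q < 1 then e
  else if q ≤ n then legendreLoop n p (q * p) (e + PySem.Int.floordiv n q)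
  else e
termination_by (n + 1 - q).toNat
decreasing_by
  have hq : 1 ≤ q := by omega
  have hp : 2 ≤ p := by omega
  have : q < q * p := by nlinarith
  omega

def solution_alt (n : Int) : Int :=
  let counts : List Int := (PySem.List.pyRange 2 (n + 1) 1).foldl
      (fun acc p => if isPrimeLoop p 2 then acc ++ [legendreLoop n p p 0] else acc) []
  let c2 : Int := counts.countP (fun e => 2 ≤ e)
  let c4 : Int := counts.countP (fun e => 4 ≤ e)
  let c14 : Int := counts.countP (fun e => 14 ≤ e)
  let c24 : Int := counts.countP (fun e => 24 ≤ e)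
  let c74 : Int := counts.countP (fun e => 74 ≤ e)
  c74 + c24 * (c2 - 1) + c14 * (c4 - 1) + PySem.Int.floordiv (c4 * (c4 - 1) * (c2 - 2)) 2

-- ===== PRECONDITION & SPEC =====
def Spec_solution (n : Int) (out : Int) : Prop := out = solution_alt n
instance (n : Int) (out : Int) : Decidable (Spec_solution n out) := by unfold Spec_solution; infer_instance

-- ===== CLAIM (what is proved, stated in full; the proofs are below) =====
def Claim_equal_solution : Prop := ∀ (n : Int), Dom_solution n → Spec_solution n (solution n)

-- ===== LEMMAS AND PROOFS =====

-- the exponent list A's first phase builds, in closed form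
def factList (n : Int) : List Int :=
  (List.range (n + 1).toNat).map (fun k => ((Nat.factorial n.toNat).factorization k : Int))

theorem apl_length (n i : Int) (ps : List Int) : (addPowerLoop n i ps).length = ps.length := by
  fun_induction addPowerLoop n i ps <;> simp_all

theorem getD_set' (l : List Int) (k j : Nat) (v : Int) (hk : k < l.length) :
    (l.set k v).getD j 0 = if j = k then v else l.getD j 0 := by
  by_cases hj : j < l.length
  · rw [List.getD_eq_getElem _ _ (by simpa using hj), List.getElem_set]
    split_ifs with h1 h2 h3 <;> try (first | rfl | omega)
    · rw [List.getD_eq_getElem _ _ hj]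
  · have hj2 : ¬ j < (l.set k v).length := by simpa using hj
    rw [List.getD_eq_default _ _ (by omega), List.getD_eq_default _ _ (by simp at hj2; omega)]
    split_ifs with h
    · omega
    · rfl

theorem apl_spec : ∀ (m i : Int) (ps : List Int), 1 ≤ m → 2 ≤ i →
    (∀ d : Int, 2 ≤ d → d < i → ¬ d ∣ m) → m < (ps.length : Int) →
    ∀ k : ℕ, (addPowerLoop m i ps).getD k 0 = ps.getD k 0 + (m.toNat.factorization k : Int) := by
  intro m i ps
  fun_induction addPowerLoop m i ps with
  | case1 i ps =>
    intro _ _ _ _ k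
    simp
  | case2 m i ps h1 h2 =>
    intro hm hi hfac hlen k
    exfalso
    obtain ⟨q, hq, hqd⟩ := Nat.exists_prime_and_dvd (n := m.toNat) (by omega)
    have hqd' : (q : Int) ∣ m := by
      have he : m = (m.toNat : Int) := by omega
      rw [he]; exact_mod_cast hqd
    have hqle : q ≤ m.toNat := Nat.le_of_dvd (by omega) hqd
    have hq2 := hq.two_le
    exact hfac q (by exact_mod_cast hq2) (by omega) hqd'
  | case3 m i ps h1 h2 hmod ih =>
    intro hm hi hfac hlen k
    have hm2 : 2 ≤ m := by omega
    have him : i ≤ m := by omega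
    have hdvd : i ∣ m := (PySem.Int.mod_eq_zero_iff_dvd m i).mp hmod
    have hfd : PySem.Int.floordiv m i = m / i := PySem.Int.floordiv_eq_ediv_of_pos (by omega)
    have hm1 : 1 ≤ m / i := by
      rw [Int.le_ediv_iff_mul_le (by omega)]; omega
    have hmeq : m / i * i = m := Int.ediv_mul_cancel hdvd
    have hlt : m / i < m := by
      apply Int.ediv_lt_of_lt_mul (by omega); nlinarith
    have hdvd2 : m / i ∣ m := ⟨i, hmeq.symm⟩
    have hprime : i.toNat.Prime := by
      rw [Nat.prime_def_lt']
      refine ⟨by omega, fun d hd1 hd2 hdd => ?_⟩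
      apply hfac d (by exact_mod_cast hd1) (by omega)
      have hdi : (d : Int) ∣ (i.toNat : Int) := by exact_mod_cast hdd
      rw [Int.toNat_of_nonneg (by omega)] at hdi
      exact dvd_trans hdi hdvd
    have ihh := ih (by rw [hfd]; exact hm1) hi
      (fun d hd1 hd2 hdd => hfac d hd1 hd2 (dvd_trans (by rwa [hfd] at hdd) hdvd2))
      (by rw [hfd]; simp only [List.length_set]; exact hlt.trans hlen) k
    rw [ihh, hfd]
    have hklen : i.toNat < ps.length := by omega
    rw [getD_set' ps i.toNat k _ hklen]
    have hmnat : m.toNat = i.toNat * (m / i).toNat := by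
      have e1 : ((i.toNat : Int)) = i := Int.toNat_of_nonneg (by omega)
      have e2 : (((m / i).toNat : Int)) = m / i := Int.toNat_of_nonneg (by omega)
      have h1 : (m.toNat : Int) = ((i.toNat * (m / i).toNat : ℕ) : Int) := by
        push_cast
        rw [e1, e2, Int.toNat_of_nonneg (show (0:Int) ≤ m by omega), mul_comm]
        exact hmeq.symm
      exact_mod_cast h1
    rw [hmnat, Nat.factorization_mul (by omega) (by omega), Finsupp.add_apply,
        hprime.factorization, Finsupp.single_apply]
    by_cases hk : i.toNat = k
    · simp only [hk]
      push_cast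
      ring
    · rw [if_neg hk, if_neg (fun h => hk h.symm)]
      push_cast
      ring
  | case4 m i ps h1 h2 hmod ih =>
    intro hm hi hfac hlen k
    apply ih hm (by omega) _ hlen
    intro d hd1 hd2 hdd
    by_cases hdi : d = i
    · subst hdi
      exact absurd ((PySem.Int.mod_eq_zero_iff_dvd m d).mpr hdd) hmod
    · exact hfac d hd1 (by omega) hdd

theorem fold_ps_length : ∀ (l : List Int) (ps : List Int),
    (l.foldl (fun acc i => addPowerLoop i 2 acc) ps).length = ps.length := by
  intro l
  induction l with
  | nil => intro ps; rfl
  | cons x t ih => intro ps; simp only [List.foldl_cons]; rw [ih, apl_length]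

theorem fold_ps_spec : ∀ (l : List Int) (ps : List Int),
    (∀ i ∈ l, 2 ≤ i ∧ i < (ps.length : Int)) → ∀ k : ℕ,
    (l.foldl (fun acc i => addPowerLoop i 2 acc) ps).getD k 0
      = ps.getD k 0 + ((l.map (fun i => (i.toNat.factorization k : Int))).sum) := by
  intro l
  induction l with
  | nil => intro ps _ k; simp
  | cons x t ih =>
    intro ps h k
    simp only [List.foldl_cons, List.map_cons, List.sum_cons]
    have hx := h x (List.mem_cons_self)
    rw [ih (addPowerLoop x 2 ps)
        (by intro i hi; rw [apl_length]; exact h i (List.mem_cons_of_mem x hi)) k,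
      apl_spec x 2 ps (by omega) le_rfl (by intro d hd1 hd2 _; omega) hx.2 k]
    ring

theorem sum_fact (k : ℕ) : ∀ M : ℕ,
    ((List.range M).map (fun j => (((j + 2).factorization k : ℕ) : Int))).sum
      = ((Nat.factorial (M + 1)).factorization k : Int) := by
  intro M
  induction M with
  | zero => simp [Nat.factorial]
  | succ m ih =>
    rw [List.range_succ, List.map_append, List.sum_append, ih]
    simp only [List.map_cons, List.map_nil, List.sum_cons, List.sum_nil]
    have hf : Nat.factorial (m + 1 + 1) = (m + 2) * Nat.factorial (m + 1) := rfl
    rw [hf, Nat.factorization_mul (by omega) (Nat.factorial_ne_zero _), Finsupp.add_apply]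
    push_cast
    ring

theorem ps_eq (n : Int) (hn : 1 ≤ n) :
    (PySem.List.pyRange 2 (n + 1) 1).foldl (fun acc i => addPowerLoop i 2 acc)
        (List.replicate (n + 1).toNat 0)
      = factList n := by
  apply List.ext_getElem
  · rw [fold_ps_length]
    simp [factList]
  · intro k h1 h2
    have hk1 : k < (n + 1).toNat := by
      have h1' := h1
      rw [fold_ps_length] at h1'
      simpa using h1'
    rw [← List.getD_eq_getElem _ 0 h1, ← List.getD_eq_getElem _ 0 h2]
    rw [fold_ps_spec _ _ (by
      intro i hi
      rw [PySem.List.mem_pyRange_one] at hi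
      refine ⟨hi.1, ?_⟩
      simp only [List.length_replicate]
      omega)]
    have hbase : (List.replicate (n + 1).toNat (0:Int)).getD k 0 = 0 := by
      rw [List.getD_eq_getElem _ 0 (by simpa using hk1), List.getElem_replicate]
    rw [hbase, PySem.List.pyRange_one, List.map_map]
    rw [List.map_congr_left (g := fun j : ℕ => (((j + 2).factorization k : ℕ) : Int)) (by
      intro a _
      simp only [Function.comp_apply]
      have ha : ((2 : Int) + (a : Int)).toNat = a + 2 := by omega
      rw [ha])]
    have hM : ((n + 1) - 2).toNat + 1 = n.toNat := by omega
    rw [sum_fact k, hM]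
    rw [List.getD_eq_getElem _ 0 h2]
    simp [factList]

theorem getD_foldl_insert_fun (l : List Int) (f : Int → Int) (d : PySem.Dict Int Int) (t : Int) :
    (l.foldl (fun d x => d.insert x (f x)) d).getD t 0 = if t ∈ l then f t else d.getD t 0 := by
  induction l generalizing d with
  | nil => simp
  | cons x xs ih =>
    simp only [List.foldl_cons]
    rw [ih]
    by_cases h1 : t ∈ xs
    · simp [h1]
    · rw [if_neg h1, PySem.Dict.getD_insert]
      by_cases h2 : t = x
      · simp [h2]
      · simp [h1, h2, List.mem_cons]

theorem ipl_spec : ∀ (p d : Int), 2 ≤ d →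
    (isPrimeLoop p d = true ↔ (2 ≤ p ∧ ∀ e : Int, d ≤ e → e * e ≤ p → ¬ e ∣ p)) := by
  intro p d
  fun_induction isPrimeLoop p d with
  | case1 d hdd hmod =>
    intro hd2
    simp only [Bool.false_eq_true, false_iff]
    rintro ⟨hp, h⟩
    exact h d le_rfl hdd ((PySem.Int.mod_eq_zero_iff_dvd p d).mp hmod)
  | case2 d hdd hmod ih =>
    intro hd2
    rw [ih (by omega)]
    constructor
    · rintro ⟨hp, h⟩
      refine ⟨hp, fun e he hee hdvd => ?_⟩
      by_cases hde : e = d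
      · subst hde
        exact hmod ((PySem.Int.mod_eq_zero_iff_dvd p e).mpr hdvd)
      · exact h e (by omega) hee hdvd
    · rintro ⟨hp, h⟩
      exact ⟨hp, fun e he hee => h e (by omega) hee⟩
  | case3 d hdd =>
    intro hd2
    simp only [decide_eq_true_eq]
    constructor
    · intro hp
      refine ⟨hp, fun e he hee hdvd => ?_⟩
      nlinarith
    · exact fun h => h.1

theorem isPrime_iff (p : Int) (hp : 2 ≤ p) : isPrimeLoop p 2 = true ↔ p.toNat.Prime := by
  rw [ipl_spec p 2 le_rfl, Nat.prime_def_le_sqrt]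
  have hpn : ((p.toNat : Int)) = p := Int.toNat_of_nonneg (by omega)
  constructor
  · rintro ⟨_, h⟩
    refine ⟨by omega, fun m hm hms hdvd => ?_⟩
    have hmm : (m : Int) * m ≤ p := by
      have h1 := Nat.le_sqrt.mp hms
      have h2 : m * m ≤ p.toNat := le_trans (Nat.mul_le_mul le_rfl le_rfl) h1
      calc ((m : Int) * m) = ((m * m : ℕ) : Int) := by push_cast; ring
        _ ≤ ((p.toNat : ℕ) : Int) := by exact_mod_cast h1
        _ = p := hpn
    exact h m (by exact_mod_cast hm) hmm (by rw [← hpn]; exact_mod_cast hdvd)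
  · rintro ⟨h2, h⟩
    refine ⟨hp, fun e he hee hdvd => ?_⟩
    have he0 : (0 : Int) ≤ e := by omega
    have hen : ((e.toNat : Int)) = e := Int.toNat_of_nonneg he0
    have hee' : e.toNat * e.toNat ≤ p.toNat := by
      have : ((e.toNat * e.toNat : ℕ) : Int) ≤ ((p.toNat : ℕ) : Int) := by
        push_cast
        rw [hen, hpn]
        exact hee
      exact_mod_cast this
    apply h e.toNat (by omega) (Nat.le_sqrt.mpr hee')
    rw [← hpn] at hdvd
    rw [← hen] at hdvd
    exact_mod_cast hdvd

theorem leg_loop (n p : Int) (hp : 2 ≤ p) (hn : 1 ≤ n) :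
    ∀ (d j : ℕ), Nat.log p.toNat n.toNat + 1 - j = d → 1 ≤ j → ∀ e : Int,
    legendreLoop n p (p ^ j) e
      = e + ((∑ i ∈ Finset.Ico j (Nat.log p.toNat n.toNat + 1), n.toNat / p.toNat ^ i : ℕ) : Int) := by
  have hppow : ∀ j : ℕ, ((p : Int)) ^ j = ((p.toNat ^ j : ℕ) : Int) := by
    intro j
    push_cast
    rw [Int.toNat_of_nonneg (by omega)]
  intro d
  induction d with
  | zero =>
    intro j hj hj1 e
    have hlog : Nat.log p.toNat n.toNat < j := by omega
    have hq : n < p ^ j := by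
      have h1 := (Nat.log_lt_iff_lt_pow (b := p.toNat) (by omega) (y := n.toNat) (by omega)).mp hlog
      calc n = ((n.toNat : ℕ) : Int) := by omega
        _ < ((p.toNat ^ j : ℕ) : Int) := by exact_mod_cast h1
        _ = p ^ j := (hppow j).symm
    rw [legendreLoop, if_neg (by push Not; refine ⟨by omega, ?_⟩; have := pow_pos (show (0:Int) < p by omega) j; omega), if_neg (not_le.mpr hq),
      Finset.Ico_eq_empty (by omega), Finset.sum_empty]
    simp
  | succ d ih =>
    intro j hj hj1 e
    have hlog : j ≤ Nat.log p.toNat n.toNat := by omega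
    have hqn : p ^ j ≤ n := by
      have h1 : p.toNat ^ j ≤ n.toNat :=
        le_trans (Nat.pow_le_pow_right (by omega) hlog) (Nat.pow_log_le_self p.toNat (by omega))
      calc (p : Int) ^ j = ((p.toNat ^ j : ℕ) : Int) := hppow j
        _ ≤ ((n.toNat : ℕ) : Int) := by exact_mod_cast h1
        _ = n := by omega
    rw [legendreLoop, if_neg (by push Not; refine ⟨by omega, ?_⟩; have := pow_pos (show (0:Int) < p by omega) j; omega), if_pos hqn]
    have hps : p ^ j * p = p ^ (j + 1) := by ring
    rw [hps, ih (j + 1) (by omega) (by omega)]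
    have hfd : PySem.Int.floordiv n (p ^ j) = ((n.toNat / p.toNat ^ j : ℕ) : Int) := by
      rw [show n = ((n.toNat : ℕ) : Int) by omega, hppow j]
      exact_mod_cast PySem.Int.floordiv_natCast _ _
    rw [hfd,
      show (∑ i ∈ Finset.Ico j (Nat.log p.toNat n.toNat + 1), n.toNat / p.toNat ^ i)
          = n.toNat / p.toNat ^ j
            + ∑ i ∈ Finset.Ico (j + 1) (Nat.log p.toNat n.toNat + 1), n.toNat / p.toNat ^ i
        from Finset.sum_eq_sum_Ico_succ_bot (by omega) _]
    push_cast
    ring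

theorem leg_spec (n p : Int) (hn : 1 ≤ n) (hp2 : 2 ≤ p) (hp : p.toNat.Prime) :
    legendreLoop n p p 0 = ((Nat.factorial n.toNat).factorization p.toNat : Int) := by
  have h := leg_loop n p hp2 hn (Nat.log p.toNat n.toNat + 1 - 1) 1 rfl le_rfl 0
  rw [pow_one] at h
  rw [h, Nat.factorization_factorial hp (Nat.lt_succ_self _)]
  simp

theorem countB_eq (n t : Int) (hn : 1 ≤ n) (ht : 2 ≤ t) :
    (PySem.List.pyRange 2 (n + 1) 1).countP
        (fun p => isPrimeLoop p 2 && decide (t ≤ legendreLoop n p p 0))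
      = (factList n).countP (fun x => t ≤ x) := by
  rw [List.countP_congr
      (q := fun p : Int => decide (t ≤ ((Nat.factorial n.toNat).factorization p.toNat : Int)))
      (by
        intro x hx
        rw [PySem.List.mem_pyRange_one] at hx
        simp only [Bool.and_eq_true, decide_eq_true_eq]
        by_cases hpr : x.toNat.Prime
        · constructor
          · rintro ⟨-, hle⟩
            rwa [← leg_spec n x hn hx.1 hpr]
          · intro hle
            exact ⟨(isPrime_iff x hx.1).mpr hpr, by rwa [leg_spec n x hn hx.1 hpr]⟩
        · constructor
          · rintro ⟨hp, -⟩
            exact absurd ((isPrime_iff x hx.1).mp hp) hpr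
          · intro hle
            rw [Nat.factorization_eq_zero_of_not_prime _ hpr] at hle
            exfalso
            simp at hle
            omega)]
  rw [factList, List.countP_map, PySem.List.pyRange_one, List.countP_map]
  have hM : (n + 1).toNat = 2 + ((n + 1) - 2).toNat := by omega
  rw [hM, List.range_add, List.countP_append, List.countP_map]
  have hz : List.countP ((fun x : Int => decide (t ≤ x)) ∘ fun k : ℕ => ((Nat.factorial n.toNat).factorization k : Int)) (List.range 2) = 0 := by
    show List.countP _ [0, 1] = 0
    simp only [List.countP_cons, List.countP_nil, Function.comp_apply,
      Nat.factorization_eq_zero_of_not_prime _ Nat.not_prime_zero,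
      Nat.factorization_eq_zero_of_not_prime _ Nat.not_prime_one]
    simp only [Nat.cast_zero]
    simp [show ¬ (t ≤ (0 : Int)) from by omega]
  rw [hz, zero_add]
  apply List.countP_congr
  intro a _
  simp only [Function.comp_apply]
  have ha : ((2 : Int) + (a : Int)).toNat = 2 + a := by omega
  rw [ha]

theorem countB_zero (n t : Int) (hn : 1 ≤ n) (ht : n < t) :
    (factList n).countP (fun x => t ≤ x) = 0 := by
  rw [List.countP_eq_zero]
  intro x hx
  rw [factList, List.mem_map] at hx
  obtain ⟨k, hk, rfl⟩ := hx
  simp only [decide_eq_true_eq, not_le]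
  by_cases hpr : k.Prime
  · have h1 := Nat.factorization_factorial_le_div_pred hpr n.toNat
    have h2 : n.toNat / (k - 1) ≤ n.toNat := Nat.div_le_self _ _
    omega
  · rw [Nat.factorization_eq_zero_of_not_prime _ hpr]
    push_cast
    omega

theorem val_eq (n t : Int) (hn : 1 ≤ n) (ht : 2 ≤ t) :
    ((PySem.List.pyRange 2 (n + 1) 1).foldl
        (fun d p => d.insert p
          (((((PySem.List.pyRange 2 (n + 1) 1).foldl (fun acc i => addPowerLoop i 2 acc)
              (List.replicate (n + 1).toNat 0)).filter (fun x => p ≤ x)).length : Int)))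
        PySem.Dict.empty).getD t 0
      = (((PySem.List.pyRange 2 (n + 1) 1).foldl
          (fun acc p => if isPrimeLoop p 2 then acc ++ [legendreLoop n p p 0] else acc)
          []).countP (fun e => t ≤ e) : Int) := by
  rw [ps_eq n hn, getD_foldl_insert_fun,
    PySem.List.foldl_append_if (p := fun p : Int => isPrimeLoop p 2)
      (f := fun p => legendreLoop n p p 0),
    List.nil_append, List.countP_map, List.countP_filter]
  have hc : List.countP
        (fun a : Int => ((fun e : Int => decide (t ≤ e)) ∘ (fun p => legendreLoop n p p 0)) a
          && (isPrimeLoop a 2)) (PySem.List.pyRange 2 (n + 1) 1)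
      = List.countP (fun p : Int => isPrimeLoop p 2 && decide (t ≤ legendreLoop n p p 0))
          (PySem.List.pyRange 2 (n + 1) 1) := by
    apply List.countP_congr
    intro x _
    simp [Bool.and_comm]
  rw [hc, countB_eq n t hn ht]
  by_cases hmem : t ∈ PySem.List.pyRange 2 (n + 1) 1
  · rw [if_pos hmem, List.countP_eq_length_filter]
  · rw [if_neg hmem,
      countB_zero n t hn (by rw [PySem.List.mem_pyRange_one] at hmem; omega)]
    rfl

-- ===== VERDICT (by name: the statement is the Claim_ definition above) =====
theorem solution_spec : Claim_equal_solution := by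
  intro n _
  unfold Spec_solution
  by_cases hn : n ≤ 1
  · simp [solution, solution_alt, PySem.List.pyRange_one_eq_nil (show n + 1 ≤ 2 by omega)]
  · simp only [solution, solution_alt]
    rw [val_eq n 2 (by omega) (by omega), val_eq n 4 (by omega) (by omega),
        val_eq n 14 (by omega) (by omega), val_eq n 24 (by omega) (by omega),
        val_eq n 74 (by omega) (by omega)]
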